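-- pv_equiv track=rewrite | github.com/nabili-oussama/OCR-PROJET-ISEN-2021-2022 | testocrkaaglemon projet.py | estInclu
-- ===== SOURCE A (Python) =====
-- def estInclu(ensemble1 , ensemble2): # ensemble 1 inclu dans l'ensemble 2 ?
--
--     Xensemble1 = [ l[0] for l in ensemble1 ]
--     Yensemble1 = [ l[1] for l in ensemble1 ]
--     XminEnsemble1 = min(Xensemble1)
--     XmaxEnsemble1 = max(Xensemble1)
--     YminEnsemble1 = min(Yensemble1)
--     YmaxEnsemble1 = max(Yensemble1)
--
--     Xensemble2 = [ l[0] for l in ensemble2 ]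
--     Yensemble2 = [ l[1] for l in ensemble2 ]
--     XminEnsemble2 = min(Xensemble2)
--     XmaxEnsemble2 = max(Xensemble2)
--     YminEnsemble2 = min(Yensemble2)
--     YmaxEnsemble2 = max(Yensemble2)
--     if (XminEnsemble1 > XminEnsemble2 and YminEnsemble1 > YminEnsemble2 and XmaxEnsemble1 < XmaxEnsemble2 and YmaxEnsemble1 < YmaxEnsemble2):
--         return True
--     return False
-- ===== SOURCE B (Python) =====
-- def estInclu(ensemble1, ensemble2):  # ensemble 1 inclu dans l'ensemble 2 ?
--     # Pairwise quantifier formulation: the bbox of E1 is strictly inside the bbox of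
--     # E2 iff, for each of the four sides, some point of E2 lies strictly beyond every
--     # point of E1 in that coordinate. No extrema are ever computed.
--     return (any(all(q[0] < p[0] for p in ensemble1) for q in ensemble2)
--             and any(all(q[0] > p[0] for p in ensemble1) for q in ensemble2)
--             and any(all(q[1] < p[1] for p in ensemble1) for q in ensemble2)
--             and any(all(q[1] > p[1] for p in ensemble1) for q in ensemble2))
-- ===== Notes on version B (the rewrite author's own statement) =====
-- stated objective: alternative
-- what changed: B never computes any minimum or maximum: it replaces A's bounding-box construction by four pairwise quantifier tests (for each side, does some point of ensemble2 lie strictly beyond every point of ensemble1 in that coordinate), an O(n*m) comparison sweep instead of O(n+m) extrema scans.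
-- crash fix: A raises ValueError (min of an empty list) when either ensemble is empty; B returns False there when ensemble2 is empty and True when only ensemble1 is empty (vacuous inner all). — e.g. on estInclu([], []): A raises ValueError, B returns false
import Mathlib
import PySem

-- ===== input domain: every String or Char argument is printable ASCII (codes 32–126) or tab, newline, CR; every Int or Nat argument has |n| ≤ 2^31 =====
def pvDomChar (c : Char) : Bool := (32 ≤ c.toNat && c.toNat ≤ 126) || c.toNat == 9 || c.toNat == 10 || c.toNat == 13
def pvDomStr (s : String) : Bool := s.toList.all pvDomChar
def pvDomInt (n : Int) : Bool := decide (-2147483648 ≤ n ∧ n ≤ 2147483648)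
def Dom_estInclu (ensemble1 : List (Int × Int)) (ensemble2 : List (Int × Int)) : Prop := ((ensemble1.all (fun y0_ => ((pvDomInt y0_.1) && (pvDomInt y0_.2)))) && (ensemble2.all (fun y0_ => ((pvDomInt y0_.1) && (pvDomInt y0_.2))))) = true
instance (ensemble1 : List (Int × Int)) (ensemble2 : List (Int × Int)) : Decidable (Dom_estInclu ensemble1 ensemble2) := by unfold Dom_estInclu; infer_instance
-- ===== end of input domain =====

-- B replaces A's bounding-box min/max construction by four pairwise quantifier tests
-- (some point of ensemble2 strictly beyond every point of ensemble1, per side); objective: alternative.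

-- ===== PORT A =====
-- Literal port of A: build X/Y coordinate lists of each set, take min/max of each
-- (Python min/max → PySem.List.min?/max?; none = ValueError on an empty set, excluded by Pre_).
def estInclu (ensemble1 : List (Int × Int)) (ensemble2 : List (Int × Int)) : Bool :=
  let X1 := ensemble1.map (fun l => l.1)
  let Y1 := ensemble1.map (fun l => l.2)
  let X2 := ensemble2.map (fun l => l.1)
  let Y2 := ensemble2.map (fun l => l.2)
  match PySem.List.min? X1 (fun v => v), PySem.List.max? X1 (fun v => v),
        PySem.List.min? Y1 (fun v => v), PySem.List.max? Y1 (fun v => v),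
        PySem.List.min? X2 (fun v => v), PySem.List.max? X2 (fun v => v),
        PySem.List.min? Y2 (fun v => v), PySem.List.max? Y2 (fun v => v) with
  | some xmin1, some xmax1, some ymin1, some ymax1,
    some xmin2, some xmax2, some ymin2, some ymax2 =>
      if xmin1 > xmin2 ∧ ymin1 > ymin2 ∧ xmax1 < xmax2 ∧ ymax1 < ymax2 then true else false
  | _, _, _, _, _, _, _, _ => false

-- ===== PORT B =====
-- B's four any/all pairwise tests, no extrema computed.
def estInclu_alt (ensemble1 : List (Int × Int)) (ensemble2 : List (Int × Int)) : Bool :=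
  (ensemble2.any (fun q => ensemble1.all (fun p => q.1 < p.1)))
  && (ensemble2.any (fun q => ensemble1.all (fun p => q.1 > p.1)))
  && (ensemble2.any (fun q => ensemble1.all (fun p => q.2 < p.2)))
  && (ensemble2.any (fun q => ensemble1.all (fun p => q.2 > p.2)))

-- ===== PRECONDITION & SPEC =====
-- Pre_ excludes empty point sets: there A raises ValueError (min of empty list); B returns a value (see Raises_).
def Pre_estInclu (ensemble1 : List (Int × Int)) (ensemble2 : List (Int × Int)) : Prop :=
  ensemble1 ≠ [] ∧ ensemble2 ≠ []
instance (ensemble1 : List (Int × Int)) (ensemble2 : List (Int × Int)) : Decidable (Pre_estInclu ensemble1 ensemble2) := by unfold Pre_estInclu; infer_instance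
def pvWitness_estInclu : (List (Int × Int)) × (List (Int × Int)) := ([(1, 1), (2, 2)], [(0, 0), (3, 3)])

-- A raises ValueError (min() of an empty coordinate list) whenever either ensemble is empty; B returns a
-- Bool there (False at the witness below, where ensemble2 is empty).
def Raises_estInclu (ensemble1 : List (Int × Int)) (ensemble2 : List (Int × Int)) : Prop :=
  ensemble1 = [] ∨ ensemble2 = []
instance (ensemble1 : List (Int × Int)) (ensemble2 : List (Int × Int)) : Decidable (Raises_estInclu ensemble1 ensemble2) := by unfold Raises_estInclu; infer_instance
def pvRaiseWitness_estInclu : (List (Int × Int)) × (List (Int × Int)) := ([], [])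
def pvRaiseWitnessOut_estInclu : Bool := false

def Spec_estInclu (ensemble1 : List (Int × Int)) (ensemble2 : List (Int × Int)) (out : Bool) : Prop := out = estInclu_alt ensemble1 ensemble2
instance (ensemble1 : List (Int × Int)) (ensemble2 : List (Int × Int)) (out : Bool) : Decidable (Spec_estInclu ensemble1 ensemble2 out) := by unfold Spec_estInclu; infer_instance

-- ===== CLAIM (what is proved, stated in full; the proofs are below) =====
def Claim_equal_estInclu : Prop := ∀ (ensemble1 : List (Int × Int)) (ensemble2 : List (Int × Int)), Dom_estInclu ensemble1 ensemble2 → Pre_estInclu ensemble1 ensemble2 → Spec_estInclu ensemble1 ensemble2 (estInclu ensemble1 ensemble2)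
def Claim_raises_estInclu : Prop := (∀ (ensemble1 : List (Int × Int)) (ensemble2 : List (Int × Int)), Dom_estInclu ensemble1 ensemble2 → Raises_estInclu ensemble1 ensemble2 → ¬ Pre_estInclu ensemble1 ensemble2) ∧ (Dom_estInclu (pvRaiseWitness_estInclu.1) (pvRaiseWitness_estInclu.2) ∧ Raises_estInclu (pvRaiseWitness_estInclu.1) (pvRaiseWitness_estInclu.2) ∧ estInclu_alt (pvRaiseWitness_estInclu.1) (pvRaiseWitness_estInclu.2) = pvRaiseWitnessOut_estInclu)

-- ===== LEMMAS AND PROOFS =====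

-- "c is strictly below the running minimum" = "c is strictly below the seed and every element".
theorem lt_foldl_min (xs : List Int) : ∀ (a c : Int),
    c < xs.foldl min a ↔ c < a ∧ ∀ v ∈ xs, c < v := by
  induction xs with
  | nil => intro a c; simp
  | cons x t ih =>
    intro a c
    simp only [List.foldl_cons, ih, List.mem_cons, lt_min_iff]
    constructor
    · rintro ⟨⟨ha, hx⟩, hall⟩
      exact ⟨ha, fun v hv => hv.elim (fun e => e ▸ hx) (hall v)⟩
    · rintro ⟨ha, hall⟩
      exact ⟨⟨ha, hall x (Or.inl rfl)⟩, fun v hv => hall v (Or.inr hv)⟩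

-- "the running minimum is strictly below c" = "the seed or some element is strictly below c".
theorem foldl_min_lt (xs : List Int) : ∀ (a c : Int),
    xs.foldl min a < c ↔ a < c ∨ ∃ v ∈ xs, v < c := by
  induction xs with
  | nil => intro a c; simp
  | cons x t ih =>
    intro a c
    simp only [List.foldl_cons, ih, List.mem_cons, min_lt_iff]
    constructor
    · rintro ((h | h) | ⟨v, hv, hvc⟩)
      · exact Or.inl h
      · exact Or.inr ⟨x, Or.inl rfl, h⟩
      · exact Or.inr ⟨v, Or.inr hv, hvc⟩
    · rintro (h | ⟨v, rfl | hv, hvc⟩)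
      · exact Or.inl (Or.inl h)
      · exact Or.inl (Or.inr hvc)
      · exact Or.inr ⟨v, hv, hvc⟩

theorem foldl_max_lt (xs : List Int) : ∀ (a c : Int),
    xs.foldl max a < c ↔ a < c ∧ ∀ v ∈ xs, v < c := by
  induction xs with
  | nil => intro a c; simp
  | cons x t ih =>
    intro a c
    simp only [List.foldl_cons, ih, List.mem_cons, max_lt_iff]
    constructor
    · rintro ⟨⟨ha, hx⟩, hall⟩
      exact ⟨ha, fun v hv => hv.elim (fun e => e ▸ hx) (hall v)⟩
    · rintro ⟨ha, hall⟩
      exact ⟨⟨ha, hall x (Or.inl rfl)⟩, fun v hv => hall v (Or.inr hv)⟩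

theorem lt_foldl_max (xs : List Int) : ∀ (a c : Int),
    c < xs.foldl max a ↔ c < a ∨ ∃ v ∈ xs, c < v := by
  induction xs with
  | nil => intro a c; simp
  | cons x t ih =>
    intro a c
    simp only [List.foldl_cons, ih, List.mem_cons, lt_max_iff]
    constructor
    · rintro ((h | h) | ⟨v, hv, hvc⟩)
      · exact Or.inl h
      · exact Or.inr ⟨x, Or.inl rfl, h⟩
      · exact Or.inr ⟨v, Or.inr hv, hvc⟩
    · rintro (h | ⟨v, rfl | hv, hvc⟩)
      · exact Or.inl (Or.inl h)
      · exact Or.inl (Or.inr hvc)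
      · exact Or.inr ⟨v, hv, hvc⟩

-- A's "min over set2 < min over set1" is B's "some point of set2 is below every point of set1" (per key f).
theorem bridge_min (f : Int × Int → Int) (p1 : Int × Int) (r1 : List (Int × Int))
    (p2 : Int × Int) (r2 : List (Int × Int)) :
    ((r2.map f).foldl min (f p2) < (r1.map f).foldl min (f p1)) ↔
      ∃ q ∈ p2 :: r2, ∀ p ∈ p1 :: r1, f q < f p := by
  rw [foldl_min_lt]
  simp only [lt_foldl_min, List.mem_map, List.mem_cons]
  constructor
  · rintro (⟨h, hall⟩ | ⟨v, hv, h, hall⟩)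
    · exact ⟨p2, Or.inl rfl, fun p hp => hp.elim (fun e => e ▸ h) (fun hp => hall (f p) ⟨p, hp, rfl⟩)⟩
    · obtain ⟨q, hq, rfl⟩ := hv
      exact ⟨q, Or.inr hq, fun p hp => hp.elim (fun e => e ▸ h) (fun hp => hall (f p) ⟨p, hp, rfl⟩)⟩
  · rintro ⟨q, hq, hall⟩
    rcases hq with rfl | hq
    · exact Or.inl ⟨hall p1 (Or.inl rfl), fun v hv => by obtain ⟨p, hp, rfl⟩ := hv; exact hall p (Or.inr hp)⟩
    · exact Or.inr ⟨f q, ⟨q, hq, rfl⟩, hall p1 (Or.inl rfl), fun v hv => by obtain ⟨p, hp, rfl⟩ := hv; exact hall p (Or.inr hp)⟩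

-- A's "max over set1 < max over set2" is B's "some point of set2 is above every point of set1" (per key f).
theorem bridge_max (f : Int × Int → Int) (p1 : Int × Int) (r1 : List (Int × Int))
    (p2 : Int × Int) (r2 : List (Int × Int)) :
    ((r1.map f).foldl max (f p1) < (r2.map f).foldl max (f p2)) ↔
      ∃ q ∈ p2 :: r2, ∀ p ∈ p1 :: r1, f p < f q := by
  rw [lt_foldl_max]
  simp only [foldl_max_lt, List.mem_map, List.mem_cons]
  constructor
  · rintro (⟨h, hall⟩ | ⟨v, hv, h, hall⟩)
    · exact ⟨p2, Or.inl rfl, fun p hp => hp.elim (fun e => e ▸ h) (fun hp => hall (f p) ⟨p, hp, rfl⟩)⟩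
    · obtain ⟨q, hq, rfl⟩ := hv
      exact ⟨q, Or.inr hq, fun p hp => hp.elim (fun e => e ▸ h) (fun hp => hall (f p) ⟨p, hp, rfl⟩)⟩
  · rintro ⟨q, hq, hall⟩
    rcases hq with rfl | hq
    · exact Or.inl ⟨hall p1 (Or.inl rfl), fun v hv => by obtain ⟨p, hp, rfl⟩ := hv; exact hall p (Or.inr hp)⟩
    · exact Or.inr ⟨f q, ⟨q, hq, rfl⟩, hall p1 (Or.inl rfl), fun v hv => by obtain ⟨p, hp, rfl⟩ := hv; exact hall p (Or.inr hp)⟩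

-- ===== VERDICT (by name: the statement is the Claim_ definition above) =====
theorem estInclu_spec : Claim_equal_estInclu := by
  intro e1 e2 _ hpre
  obtain ⟨h1, h2⟩ := hpre
  obtain ⟨p1, r1, rfl⟩ := List.exists_cons_of_ne_nil h1
  obtain ⟨p2, r2, rfl⟩ := List.exists_cons_of_ne_nil h2
  unfold Spec_estInclu estInclu estInclu_alt
  simp only [List.map_cons, PySem.List.min?_id_cons, PySem.List.max?_id_cons]
  rw [Bool.eq_iff_iff]
  simp only [Bool.ite_eq_true_distrib, Bool.and_eq_true, List.any_eq_true,
    List.all_eq_true, decide_eq_true_eq, gt_iff_lt,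
    bridge_min (fun l => l.1), bridge_min (fun l => l.2),
    bridge_max (fun l => l.1), bridge_max (fun l => l.2)]
  constructor
  · intro h
    split_ifs at h with hc
    exact ⟨⟨⟨hc.1, hc.2.2.1⟩, hc.2.1⟩, hc.2.2.2⟩
  · rintro ⟨⟨⟨ha, hb⟩, hcnd⟩, hd⟩
    rw [if_pos ⟨ha, hcnd, hb, hd⟩]
    trivial

@[simp] theorem estInclu_raises : Claim_raises_estInclu := by
  unfold Claim_raises_estInclu
  refine ⟨?_, by decide⟩
  rintro e1 e2 _ (rfl | rfl) ⟨ha, hb⟩ <;> simp_all
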